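-- pv_equiv track=rewrite | github.com/DaDa-shang/MyActivityJournal | Lockdown Phases Separation.py | assign_phase
-- ===== SOURCE A (Python) =====
-- def assign_phase(activity_date):
--     phase_dates = [
--         (20200615, 20200913),
--         (20200914, 20201201),
--         (20201202, 20210105),
--         (20210106, 20210307),
--         (20210308, 20210718),
--         (20210719, 20211207),
--         (20211208, 20220316),
--     ]
--
--     for i, (start_date, end_date) in enumerate(phase_dates):
--         if activity_date >= start_date and activity_date <= end_date:
--             return i + 1
--     return 0
-- ===== SOURCE B (Python) =====
-- # Binary search over the gapless phase-boundary table instead of a linear interval scan.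
-- _BOUNDS = [20200615, 20200914, 20201202, 20210106, 20210308, 20210719, 20211208, 20220317]
--
-- def assign_phase(activity_date):
--     if activity_date < 20200615 or activity_date > 20220316:
--         return 0
--     lo, hi = 0, len(_BOUNDS)
--     while lo < hi:
--         mid = (lo + hi) // 2
--         if activity_date < _BOUNDS[mid]:
--             hi = mid
--         else:
--             lo = mid + 1
--     return lo
-- ===== Notes on version B (the rewrite author's own statement) =====
-- stated objective: alternative
-- what changed: Replaces the linear scan over seven (start,end) intervals with a binary search (bisect_right) over the sorted boundary table of the gapless phases, after a single out-of-range guard.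
import Mathlib
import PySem

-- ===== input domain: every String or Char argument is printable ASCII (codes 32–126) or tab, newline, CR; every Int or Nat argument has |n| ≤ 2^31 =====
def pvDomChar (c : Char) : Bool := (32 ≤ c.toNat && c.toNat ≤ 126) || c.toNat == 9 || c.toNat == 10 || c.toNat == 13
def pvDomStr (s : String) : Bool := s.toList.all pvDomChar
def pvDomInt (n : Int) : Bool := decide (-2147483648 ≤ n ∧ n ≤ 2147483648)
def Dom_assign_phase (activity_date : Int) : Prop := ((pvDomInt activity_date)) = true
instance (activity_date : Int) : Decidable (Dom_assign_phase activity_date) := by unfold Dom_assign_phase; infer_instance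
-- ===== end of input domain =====

-- B replaces A's linear scan of seven intervals with a binary search over the sorted
-- boundary table of the gapless phases (objective: alternative algorithm, same cost class).

-- ===== PORT A =====
-- the enumerated interval loop: first matching interval returns i+1, else 0
def assignPhaseLoop (activity_date : Int) : List (Int × (Int × Int)) → Int
  | [] => 0
  | (i, (start_date, end_date)) :: rest =>
      if activity_date ≥ start_date ∧ activity_date ≤ end_date then i + 1
      else assignPhaseLoop activity_date rest

def pvPhaseDates : List (Int × Int) :=
  [(20200615, 20200913), (20200914, 20201201), (20201202, 20210105),
   (20210106, 20210307), (20210308, 20210718), (20210719, 20211207),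
   (20211208, 20220316)]

def assign_phase (activity_date : Int) : Int :=
  assignPhaseLoop activity_date (PySem.List.enumerate pvPhaseDates)

-- ===== PORT B =====
def pvBounds : List Int :=
  [20200615, 20200914, 20201202, 20210106, 20210308, 20210719, 20211208, 20220317]

-- the while-loop of Source B, with fuel making the descent structural (fuel ≥ hi-lo suffices)
def bisectLoop (x : Int) : Nat → Nat → Nat → Nat
  | 0, lo, _ => lo
  | fuel + 1, lo, hi =>
      if lo < hi then
        let mid := (lo + hi) / 2
        if x < pvBounds.getD mid 0 then bisectLoop x fuel lo mid
        else bisectLoop x fuel (mid + 1) hi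
      else lo

def assign_phase_alt (activity_date : Int) : Int :=
  if activity_date < 20200615 ∨ activity_date > 20220316 then 0
  else (bisectLoop activity_date 8 0 8 : Int)

-- ===== PRECONDITION & SPEC =====
def Spec_assign_phase (activity_date : Int) (out : Int) : Prop := out = assign_phase_alt activity_date
instance (activity_date : Int) (out : Int) : Decidable (Spec_assign_phase activity_date out) := by unfold Spec_assign_phase; infer_instance

-- ===== CLAIM (what is proved, stated in full; the proofs are below) =====
def Claim_equal_assign_phase : Prop := ∀ (activity_date : Int), Dom_assign_phase activity_date → Spec_assign_phase activity_date (assign_phase activity_date)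

-- ===== LEMMAS AND PROOFS =====

-- ===== VERDICT (by name: the statement is the Claim_ definition above) =====
theorem assign_phase_spec : Claim_equal_assign_phase := by
  intro d _
  unfold Spec_assign_phase assign_phase assign_phase_alt
  rw [show PySem.List.enumerate pvPhaseDates =
      [((0 : Int), ((20200615 : Int), (20200913 : Int))), (1, (20200914, 20201201)),
       (2, (20201202, 20210105)), (3, (20210106, 20210307)), (4, (20210308, 20210718)),
       (5, (20210719, 20211207)), (6, (20211208, 20220316))] from rfl]
  simp only [assignPhaseLoop, bisectLoop, pvBounds, List.getD, List.getElem?_cons_zero,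
    List.getElem?_cons_succ, Option.getD_some, Nat.reduceDiv, Nat.reduceAdd, Nat.reduceLT,
    if_true, if_false, ge_iff_le]
  split_ifs <;> omega
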